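-- pv_equiv track=rewrite | github.com/Dmytro-Khvedchuk/RSPCP_bachelors_thesis | src/tests/forecasting/test_cpcv.py | _find_contiguous_segments
-- ===== SOURCE A (Python) =====
-- def _find_contiguous_segments(sorted_values: list[int]) -> list[tuple[int, int]]:
--     """Detect contiguous segments in a sorted list of integers.
--
--     Two values are contiguous when they differ by exactly 1.
--
--     Args:
--         sorted_values: Sorted unique integer values.
--
--     Returns:
--         List of (start, end) tuples for each contiguous segment.
--     """
--     if not sorted_values:
--         return []
--     segments: list[tuple[int, int]] = []
--     seg_start: int = sorted_values[0]
--     seg_end: int = sorted_values[0]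
--     for i in range(1, len(sorted_values)):
--         if sorted_values[i] == seg_end + 1:
--             seg_end = sorted_values[i]
--         else:
--             segments.append((seg_start, seg_end))
--             seg_start = sorted_values[i]
--             seg_end = sorted_values[i]
--     segments.append((seg_start, seg_end))
--     return segments
-- ===== SOURCE B (Python) =====
-- def _find_contiguous_segments(sorted_values: list[int]) -> list[tuple[int, int]]:
--     """Detect contiguous segments via a break-index table built first."""
--     if not sorted_values:
--         return []
--     n = len(sorted_values)
--     breaks = [i for i in range(1, n) if sorted_values[i] != sorted_values[i - 1] + 1]
--     starts = [0] + breaks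
--     ends = [b - 1 for b in breaks] + [n - 1]
--     return [(sorted_values[s], sorted_values[e]) for s, e in zip(starts, ends)]
-- ===== Notes on version B (the rewrite author's own statement) =====
-- stated objective: alternative
-- what changed: Replaces the stateful accumulator loop (running seg_start/seg_end with in-loop appends) by a two-phase index construction: first a table of break indices, then segments assembled by zipping start/end index lists and mapping through the values.
import Mathlib
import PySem

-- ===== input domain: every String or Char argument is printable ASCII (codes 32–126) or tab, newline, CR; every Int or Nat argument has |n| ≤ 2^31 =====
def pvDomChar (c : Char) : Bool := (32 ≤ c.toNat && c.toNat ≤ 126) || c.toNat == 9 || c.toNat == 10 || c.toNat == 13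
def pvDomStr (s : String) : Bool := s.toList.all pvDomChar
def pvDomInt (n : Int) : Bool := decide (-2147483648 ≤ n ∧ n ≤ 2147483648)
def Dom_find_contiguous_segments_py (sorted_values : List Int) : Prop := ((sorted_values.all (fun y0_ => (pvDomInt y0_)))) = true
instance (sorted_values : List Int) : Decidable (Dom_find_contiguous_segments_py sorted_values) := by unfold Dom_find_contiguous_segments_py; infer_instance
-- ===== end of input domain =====

-- B replaces A's stateful accumulator loop by a two-phase construction (break-index
-- table first, then segments assembled by zipping start/end index lists); alternative
-- decomposition, same O(n) cost.

-- ===== PORT A =====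
-- loop body of A: state = (segments, seg_start, seg_end), y = sorted_values[i]
def pvStepA (st : List (Int × Int) × Int × Int) (y : Int) : List (Int × Int) × Int × Int :=
  if y = st.2.2 + 1 then (st.1, st.2.1, y)
  else (st.1 ++ [(st.2.1, st.2.2)], y, y)

def find_contiguous_segments_py (sorted_values : List Int) : List (Int × Int) :=
  if sorted_values = [] then []
  else
    let s0 := PySem.List.pyGetD sorted_values 0 0
    let st := (PySem.List.pyRange 1 (PySem.List.len sorted_values) 1).foldl
      (fun st i => pvStepA st (PySem.List.pyGetD sorted_values i 0)) ([], s0, s0)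
    st.1 ++ [(st.2.1, st.2.2)]

-- ===== PORT B =====
def find_contiguous_segments_py_alt (sorted_values : List Int) : List (Int × Int) :=
  if sorted_values = [] then []
  else
    let n : Int := PySem.List.len sorted_values
    let breaks := (PySem.List.pyRange 1 n 1).filter
      (fun i => !(PySem.List.pyGetD sorted_values i 0 == PySem.List.pyGetD sorted_values (i - 1) 0 + 1))
    let starts := 0 :: breaks
    let ends := breaks.map (fun b => b - 1) ++ [n - 1]
    (starts.zip ends).map
      (fun p => (PySem.List.pyGetD sorted_values p.1 0, PySem.List.pyGetD sorted_values p.2 0))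

-- ===== PRECONDITION & SPEC =====
def Spec_find_contiguous_segments_py (sorted_values : List Int) (out : List (Int × Int)) : Prop := out = find_contiguous_segments_py_alt sorted_values
instance (sorted_values : List Int) (out : List (Int × Int)) : Decidable (Spec_find_contiguous_segments_py sorted_values out) := by unfold Spec_find_contiguous_segments_py; infer_instance

-- ===== CLAIM (what is proved, stated in full; the proofs are below) =====
def Claim_equal_find_contiguous_segments_py : Prop := ∀ (sorted_values : List Int), Dom_find_contiguous_segments_py sorted_values → Spec_find_contiguous_segments_py sorted_values (find_contiguous_segments_py sorted_values)

-- ===== LEMMAS AND PROOFS =====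

-- value-level recursion both ports are reduced to
def pvSeg : Int → Int → List Int → List (Int × Int)
  | s, e, [] => [(s, e)]
  | s, e, y :: ys => if y = e + 1 then pvSeg s y ys else (s, e) :: pvSeg y y ys

theorem pvSeg_ne_nil (s e : Int) (l : List Int) : pvSeg s e l ≠ [] := by
  induction l generalizing s e with
  | nil => simp [pvSeg]
  | cons y ys ih => simp only [pvSeg]; split_ifs <;> simp [ih]

theorem pvA_fold (l : List Int) (segs : List (Int × Int)) (s e : Int) :
    (l.foldl pvStepA (segs, s, e)).1 ++
      [((l.foldl pvStepA (segs, s, e)).2.1, (l.foldl pvStepA (segs, s, e)).2.2)]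
    = segs ++ pvSeg s e l := by
  induction l generalizing segs s e with
  | nil => simp [pvSeg]
  | cons y ys ih =>
    simp only [List.foldl_cons, pvStepA, pvSeg]
    split_ifs with h
    · exact ih segs s y
    · rw [ih (segs ++ [(s, e)]) y y]; simp

theorem pvA_eq_seg (x : Int) (xs : List Int) :
    find_contiguous_segments_py (x :: xs) = pvSeg x x xs := by
  unfold find_contiguous_segments_py
  simp only [if_neg (List.cons_ne_nil x xs)]
  rw [PySem.List.foldl_pyRange_pyGetD (x :: xs) 0 pvStepA _ (show (0:Int) ≤ 1 by norm_num)]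
  rw [PySem.List.pyGetD_zero_cons]
  simpa using pvA_fold xs [] x x

theorem pvGetD_append_lt (ys zs : List Int) (i : Int) (h0 : 0 ≤ i) (h : i < ys.length) :
    PySem.List.pyGetD (ys ++ zs) i 0 = PySem.List.pyGetD ys i 0 := by
  rw [PySem.List.pyGetD_eq_getElem (ys ++ zs) 0 h0 (by simp; omega),
      PySem.List.pyGetD_eq_getElem ys 0 h0 h]
  exact List.getElem_append_left (by omega)

theorem pvSeg_append (z : Int) (l : List Int) (s e : Int) :
    pvSeg s e (l ++ [z]) =
      if z = l.getLastD e + 1 then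
        (pvSeg s e l).dropLast ++ [(((pvSeg s e l).getLastD (0, 0)).1, z)]
      else pvSeg s e l ++ [(z, z)] := by
  induction l generalizing s e with
  | nil =>
    simp only [pvSeg, List.nil_append, List.getLastD_nil]
    split_ifs <;> simp
  | cons y ys ih =>
    simp only [List.cons_append, pvSeg, List.getLastD_cons]
    by_cases h : y = e + 1
    · simp only [if_pos h]
      exact ih s y
    · simp only [if_neg h]
      rw [ih y y]
      by_cases h2 : z = ys.getLastD y + 1
      · simp only [if_pos h2]
        have hne := pvSeg_ne_nil y y ys
        rw [List.dropLast_cons_of_ne_nil hne, List.getLastD_cons]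
        rw [show (pvSeg y y ys).getLastD (s, e) = (pvSeg y y ys).getLastD (0, 0) by
          cases hps : pvSeg y y ys with
          | nil => exact absurd hps hne
          | cons a t => rw [List.getLastD_cons, List.getLastD_cons]]
        simp
      · simp only [if_neg h2, List.cons_append]

-- the break-index table of B, as a standalone term
def pvBreaks (v : List Int) : List Int :=
  (PySem.List.pyRange 1 (v.length : Int) 1).filter
    (fun i => !(PySem.List.pyGetD v i 0 == PySem.List.pyGetD v (i - 1) 0 + 1))

theorem pvB_unfold (v : List Int) (hv : v ≠ []) :
    find_contiguous_segments_py_alt v =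
      ((0 :: pvBreaks v).zip ((pvBreaks v).map (fun b => b - 1) ++ [(v.length : Int) - 1])).map
        (fun p => (PySem.List.pyGetD v p.1 0, PySem.List.pyGetD v p.2 0)) := by
  unfold find_contiguous_segments_py_alt pvBreaks
  simp [if_neg hv]

theorem pvBreaks_mem (v : List Int) (b : Int) (hb : b ∈ pvBreaks v) :
    1 ≤ b ∧ b < v.length := by
  unfold pvBreaks at hb
  exact PySem.List.mem_pyRange_one.mp (List.mem_filter.mp hb).1

theorem pvGetLastD_eq (ys : List Int) (h : ys ≠ []) (d : Int) :
    ys.getLastD d = PySem.List.pyGetD ys ((ys.length : Int) - 1) 0 := by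
  have h1 : 1 ≤ ys.length := List.length_pos_of_ne_nil h
  rw [show ((ys.length : Int) - 1) = ((ys.length - 1 : ℕ) : Int) by push_cast [h1]; ring]
  rw [PySem.List.pyGetD_natCast]
  rw [List.getLastD_eq_getLast?, List.getD_eq_getElem?_getD, ← List.getLast?_eq_getElem?]
  cases hys : ys.getLast? with
  | none => exact absurd (List.getLast?_eq_none_iff.mp hys) h
  | some a => rfl

theorem pvBreaks_append (ys : List Int) (z : Int) (hys : ys ≠ []) :
    pvBreaks (ys ++ [z]) =
      pvBreaks ys ++ (if z = ys.getLastD 0 + 1 then [] else [(ys.length : Int)]) := by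
  have h1 : 1 ≤ ys.length := List.length_pos_of_ne_nil hys
  have hlen : ((ys ++ [z]).length : Int) = (ys.length : Int) + 1 := by simp
  unfold pvBreaks
  rw [hlen, PySem.List.pyRange_one_succ_right (by exact_mod_cast h1), List.filter_append]
  congr 1
  · apply List.filter_congr
    intro i hi
    obtain ⟨hi1, hi2⟩ := PySem.List.mem_pyRange_one.mp hi
    rw [pvGetD_append_lt ys [z] i (by omega) (by exact_mod_cast hi2),
        pvGetD_append_lt ys [z] (i - 1) (by omega) (by omega)]
  · have hz : PySem.List.pyGetD (ys ++ [z]) (ys.length : Int) 0 = z := by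
      rw [PySem.List.pyGetD_natCast, List.getD_eq_getElem?_getD,
          List.getElem?_append_right (le_refl _)]
      simp
    have hl : PySem.List.pyGetD (ys ++ [z]) ((ys.length : Int) - 1) 0 = ys.getLastD 0 := by
      rw [pvGetD_append_lt ys [z] _ (by omega) (by omega)]
      exact (pvGetLastD_eq ys hys 0).symm
    simp only [List.filter_cons, List.filter_nil, hz, hl]
    by_cases h2 : z = ys.getLastD 0 + 1
    · simp [h2]
    · rw [List.getLastD_eq_getLast?] at h2
      simp [h2]

theorem pvB_eq_seg_aux (v : List Int) (hv : v ≠ []) :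
    find_contiguous_segments_py_alt v = pvSeg (v.headD 0) (v.headD 0) v.tail := by
  induction v using List.reverseRecOn with
  | nil => exact absurd rfl hv
  | append_singleton ys z ih =>
    by_cases hys : ys = []
    · subst hys
      simp only [List.nil_append]
      rw [pvB_unfold [z] (by simp)]
      simp [pvBreaks, PySem.List.pyRange_one_eq_nil, pvSeg]
    · obtain ⟨hd, tl, rfl⟩ := List.exists_cons_of_ne_nil hys
      set ys := hd :: tl with hys_def
      have h1 : 1 ≤ ys.length := List.length_pos_of_ne_nil hys
      have hlen : ((ys ++ [z]).length : Int) - 1 = (ys.length : Int) := by simp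
      have hBv := pvB_unfold (ys ++ [z]) (by simp)
      rw [hlen] at hBv
      rw [pvBreaks_append ys z hys] at hBv
      have ihy := ih hys
      rw [pvB_unfold ys hys] at ihy
      -- elements of pvBreaks ys are in [1, ys.length)
      have hmemS : ∀ s : Int, s ∈ (0 : Int) :: pvBreaks ys → 0 ≤ s ∧ s < (ys.length : Int) := by
        intro s hs
        rcases List.mem_cons.mp hs with rfl | hs
        · exact ⟨le_refl 0, by exact_mod_cast h1⟩
        · have := pvBreaks_mem ys s hs; omega
      have hmemE : ∀ e : Int, e ∈ (pvBreaks ys).map (fun b => b - 1) ++ [(ys.length : Int) - 1] →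
          0 ≤ e ∧ e < (ys.length : Int) := by
        intro e he
        rcases List.mem_append.mp he with he | he
        · obtain ⟨b, hb, rfl⟩ := List.mem_map.mp he
          have := pvBreaks_mem ys b hb; omega
        · simp at he; omega
      have hmap_eq : ∀ (L : List (Int × Int)),
          (∀ p ∈ L, p.1 ∈ (0 : Int) :: pvBreaks ys ∧
            p.2 ∈ (pvBreaks ys).map (fun b => b - 1) ++ [(ys.length : Int) - 1]) →
          L.map (fun p => (PySem.List.pyGetD (ys ++ [z]) p.1 0, PySem.List.pyGetD (ys ++ [z]) p.2 0))
          = L.map (fun p => (PySem.List.pyGetD ys p.1 0, PySem.List.pyGetD ys p.2 0)) := by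
        intro L hL
        apply List.map_congr_left
        intro p hp
        obtain ⟨h1', h2'⟩ := hL p hp
        obtain ⟨ha, hb⟩ := hmemS p.1 h1'
        obtain ⟨hc, hd'⟩ := hmemE p.2 h2'

        rw [pvGetD_append_lt ys [z] p.1 ha hb, pvGetD_append_lt ys [z] p.2 hc hd']
      have hz : PySem.List.pyGetD (ys ++ [z]) (ys.length : Int) 0 = z := by
        rw [PySem.List.pyGetD_natCast, List.getD_eq_getElem?_getD,
            List.getElem?_append_right (le_refl _)]
        simp
      have htail : (ys ++ [z]).tail = tl ++ [z] := by simp [hys_def]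
      have hheadD : (ys ++ [z]).headD 0 = hd := by simp [hys_def]
      have hlast : ys.getLastD 0 = tl.getLastD hd := by rw [hys_def, List.getLastD_cons]
      rw [htail, hheadD, pvSeg_append, ← hlast]
      rw [show ys.tail = tl from rfl, show ys.headD 0 = hd from rfl] at ihy
      by_cases h2 : z = ys.getLastD 0 + 1
      · -- no new break: last segment is extended
        rw [if_pos h2]
        rw [if_pos h2] at hBv
        rw [List.append_nil] at hBv
        -- split starts at its last element
        have hS_ne : ((0 : Int) :: pvBreaks ys) ≠ [] := List.cons_ne_nil _ _
        have hsplitS : (0 : Int) :: pvBreaks ys =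
            ((0 : Int) :: pvBreaks ys).dropLast ++ [((0 : Int) :: pvBreaks ys).getLast hS_ne] :=
          (List.dropLast_append_getLast hS_ne).symm
        have hlenS : ((0 : Int) :: pvBreaks ys).dropLast.length =
            ((pvBreaks ys).map (fun b => b - 1)).length := by simp
        set S' := ((0 : Int) :: pvBreaks ys).dropLast with hS'
        set sl := ((0 : Int) :: pvBreaks ys).getLast hS_ne with hsl
        set E := (pvBreaks ys).map (fun b => b - 1) with hE
        have hzipv : ((0 : Int) :: pvBreaks ys).zip (E ++ [(ys.length : Int)]) =
            S'.zip E ++ [(sl, (ys.length : Int))] := by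
          conv_lhs => rw [hsplitS]
          rw [List.zip_append hlenS]; rfl
        have hzipy : ((0 : Int) :: pvBreaks ys).zip (E ++ [(ys.length : Int) - 1]) =
            S'.zip E ++ [(sl, (ys.length : Int) - 1)] := by
          conv_lhs => rw [hsplitS]
          rw [List.zip_append hlenS]; rfl
        have hsub : ∀ p ∈ S'.zip E, p.1 ∈ (0 : Int) :: pvBreaks ys ∧
            p.2 ∈ E ++ [(ys.length : Int) - 1] := by
          intro p hp
          obtain ⟨hp1, hp2⟩ := List.of_mem_zip (a := p.1) (b := p.2) (by simpa using hp)
          exact ⟨List.dropLast_subset _ hp1, List.mem_append_left _ hp2⟩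
        have hsl_mem : sl ∈ (0 : Int) :: pvBreaks ys := List.getLast_mem hS_ne
        obtain ⟨hsl0, hsl1⟩ := hmemS sl hsl_mem
        rw [hzipv] at hBv
        rw [hzipy] at ihy
        rw [List.map_append] at hBv
        rw [List.map_append] at ihy
        rw [hmap_eq _ hsub] at hBv
        simp only [List.map_cons, List.map_nil] at hBv ihy
        rw [hz, pvGetD_append_lt ys [z] sl hsl0 hsl1] at hBv
        rw [hBv, ← ihy, List.dropLast_concat]
        simp [List.getLastD_eq_getLast?, List.getLast?_append]
      · -- new break at index ys.length: a fresh one-element segment is appended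
        rw [if_neg h2]
        rw [if_neg h2] at hBv
        have hlenS2 : ((0 : Int) :: pvBreaks ys).length =
            ((pvBreaks ys).map (fun b => b - 1) ++ [(ys.length : Int) - 1]).length := by simp
        have : (0 : Int) :: (pvBreaks ys ++ [(ys.length : Int)]) =
            ((0 : Int) :: pvBreaks ys) ++ [(ys.length : Int)] := by simp
        rw [this] at hBv
        rw [show ((pvBreaks ys ++ [(ys.length : Int)]).map (fun b => b - 1) ++ [(ys.length : Int)]) =
            ((pvBreaks ys).map (fun b => b - 1) ++ [(ys.length : Int) - 1]) ++ [(ys.length : Int)] from by simp] at hBv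
        rw [List.zip_append hlenS2, List.map_append] at hBv
        have hsub2 : ∀ p ∈ ((0 : Int) :: pvBreaks ys).zip
            ((pvBreaks ys).map (fun b => b - 1) ++ [(ys.length : Int) - 1]),
            p.1 ∈ (0 : Int) :: pvBreaks ys ∧
            p.2 ∈ (pvBreaks ys).map (fun b => b - 1) ++ [(ys.length : Int) - 1] := by
          intro p hp
          exact List.of_mem_zip (a := p.1) (b := p.2) (by simpa using hp)
        rw [hmap_eq _ hsub2] at hBv
        simp only [List.zip_cons_cons, List.zip_nil_right, List.map_cons, List.map_nil, hz] at hBv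
        rw [hBv, ihy]
  
-- ===== VERDICT (by name: the statement is the Claim_ definition above) =====
theorem find_contiguous_segments_py_spec : Claim_equal_find_contiguous_segments_py := by
  intro v _
  unfold Spec_find_contiguous_segments_py
  cases v with
  | nil => rfl
  | cons x xs =>
    rw [pvA_eq_seg, pvB_eq_seg_aux (x :: xs) (List.cons_ne_nil x xs)]
    simp
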